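-- pv_equiv track=rewrite | github.com/goncayilmaz/atai_agent | graph.py | getAnswerText
-- ===== SOURCE A (Python) =====
-- def getAnswerText(results):
--     resTxt = ""
--     if(results == None or len(results) == 0):
--         return "Could not find the answer!"
--     elif(len(results) == 1):
--         return results[-1]
--     elif(len(results) > 5):
--         resTxt += "Some samples are "
--         results = results[:5]
--     for i, res in enumerate(results):
--         if(i < len(results) - 2):
--             resTxt += res + ", "
--         elif(i < len(results) - 1):
--             resTxt += res + " and " + results[-1]
--     return resTxt
-- ===== SOURCE B (Python) =====
-- def getAnswerText(results):
--     if results is None or len(results) == 0: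
--         return "Could not find the answer!"
--
--     def phrase(xs):
--         # recursively build "x0, x1, ... and xlast"
--         if len(xs) == 1:
--             return xs[0]
--         if len(xs) == 2:
--             return xs[0] + " and " + xs[1]
--         return xs[0] + ", " + phrase(xs[1:])
--
--     if len(results) == 1:
--         return results[0]
--     if len(results) > 5:
--         return "Some samples are " + phrase(results[:5])
--     return phrase(results)
-- ===== Notes on version B (the rewrite author's own statement) =====
-- stated objective: alternative
-- what changed: Replaces A's index-counting enumerate loop (comparing each i against len-2 and len-1 while appending to an accumulator) with a structural recursion on the list: phrase([x]) = x, phrase([x,y]) = x + ' and ' + y, phrase(x::rest) = x + ', ' + phrase(rest); no indices or accumulator are used.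
import Mathlib
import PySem

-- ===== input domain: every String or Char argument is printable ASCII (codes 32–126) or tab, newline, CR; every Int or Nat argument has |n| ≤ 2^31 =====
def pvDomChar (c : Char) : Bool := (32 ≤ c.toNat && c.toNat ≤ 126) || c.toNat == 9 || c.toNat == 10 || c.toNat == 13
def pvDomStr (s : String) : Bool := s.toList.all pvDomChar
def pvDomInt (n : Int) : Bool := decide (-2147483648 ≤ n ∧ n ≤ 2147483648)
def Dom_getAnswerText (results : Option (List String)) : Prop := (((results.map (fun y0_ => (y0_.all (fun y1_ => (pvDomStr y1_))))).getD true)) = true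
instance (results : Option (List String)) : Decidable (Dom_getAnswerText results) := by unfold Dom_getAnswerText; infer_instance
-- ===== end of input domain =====

-- B replaces A's index-comparing enumerate loop with a structural recursion on the list ([x] → x, [x,y] → x ++ " and " ++ y, x::rest → x ++ ", " ++ phrase rest); same guards, same cost.

-- ===== PORT A =====
def getAnswerText (results : Option (List String)) : String :=
  match results with
  | none => "Could not find the answer!"
  | some rs =>
    if rs.length = 0 then "Could not find the answer!"
    else if rs.length = 1 then (PySem.List.pyGet? rs (-1)).getD ""
    else
      -- 'resTxt = ""' then possibly 'resTxt += "Some samples are "; results = results[:5]'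
      let resTxt : String := ""
      let p := if rs.length > 5 then (resTxt ++ "Some samples are ", PySem.List.slice rs none (some 5)) else (resTxt, rs)
      -- 'for i, res in enumerate(results): …'
      (PySem.List.enumerate p.2 0).foldl (fun acc ir =>
        if ir.1 < (p.2.length : Int) - 2 then acc ++ ir.2 ++ ", "
        else if ir.1 < (p.2.length : Int) - 1 then acc ++ ir.2 ++ " and " ++ ((PySem.List.pyGet? p.2 (-1)).getD "")
        else acc) p.1

-- ===== PORT B =====
-- Source B's inner 'phrase': structural recursion (len 1 / len 2 / head ++ ", " ++ phrase(tail))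
def pvPhrase : List String → String
  | [] => ""            -- unreachable: phrase is only called on non-empty lists
  | [x] => x
  | [x, y] => x ++ " and " ++ y
  | x :: rest => x ++ ", " ++ pvPhrase rest

def getAnswerText_alt (results : Option (List String)) : String :=
  match results with
  | none => "Could not find the answer!"
  | some rs =>
    if rs.length = 0 then "Could not find the answer!"
    else if rs.length = 1 then (PySem.List.pyGet? rs 0).getD ""
    else if rs.length > 5 then "Some samples are " ++ pvPhrase (PySem.List.slice rs none (some 5))
    else pvPhrase rs

-- ===== PRECONDITION & SPEC =====
def Spec_getAnswerText (results : Option (List String)) (out : String) : Prop := out = getAnswerText_alt results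
instance (results : Option (List String)) (out : String) : Decidable (Spec_getAnswerText results out) := by unfold Spec_getAnswerText; infer_instance

-- ===== CLAIM (what is proved, stated in full; the proofs are below) =====
def Claim_equal_getAnswerText : Prop := ∀ (results : Option (List String)), Dom_getAnswerText results → Spec_getAnswerText results (getAnswerText results)

-- ===== LEMMAS AND PROOFS =====

-- ===== VERDICT =====
theorem getAnswerText_spec : Claim_equal_getAnswerText := by
  intro results _
  unfold Spec_getAnswerText getAnswerText getAnswerText_alt
  rcases results with _ | rs
  · rfl
  · rcases rs with _ | ⟨a, _ | ⟨b, _ | ⟨c, _ | ⟨d, _ | ⟨e, _ | ⟨f, t⟩⟩⟩⟩⟩⟩ <;>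
      simp [PySem.List.enumerate, PySem.List.slice, PySem.List.clampIdx,
            PySem.List.pyGet?, PySem.List.pyIdx?, pvPhrase,
            ← String.toList_inj, String.toList_append]
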